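-- pv_equiv track=rewrite | github.com/FebrinaSinaga/Kriptografi | Prak9_RSA/p&qditentukan.py | string_to_blocks
-- ===== SOURCE A (Python) =====
-- def string_to_blocks(s, n):
--     data = s.encode("utf-8")
--     max_bytes = max(1, (n.bit_length() - 1) // 8)
--     blocks = []
--     for i in range(0, len(data), max_bytes):
--         chunk = data[i:i+max_bytes]
--         blocks.append(int.from_bytes(chunk, 'big'))
--     return blocks
-- ===== SOURCE B (Python) =====
-- def string_to_blocks(s, n):
--     max_bytes = max(1, (n.bit_length() - 1) // 8)
--     blocks = []
--     acc = 0
--     cnt = 0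
--     for byte in s.encode("utf-8"):
--         acc = acc * 256 + byte
--         cnt += 1
--         if cnt == max_bytes:
--             blocks.append(acc)
--             acc = 0
--             cnt = 0
--     if cnt > 0:
--         blocks.append(acc)
--     return blocks
-- ===== Notes on version B (the rewrite author's own statement) =====
-- stated objective: alternative
-- what changed: Replaces the range/slice/int.from_bytes chunking with a single pass over the bytes keeping a running integer accumulator and a byte count, flushing a block each time the count reaches max_bytes and once more for a non-empty trailing partial block.
import Mathlib
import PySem

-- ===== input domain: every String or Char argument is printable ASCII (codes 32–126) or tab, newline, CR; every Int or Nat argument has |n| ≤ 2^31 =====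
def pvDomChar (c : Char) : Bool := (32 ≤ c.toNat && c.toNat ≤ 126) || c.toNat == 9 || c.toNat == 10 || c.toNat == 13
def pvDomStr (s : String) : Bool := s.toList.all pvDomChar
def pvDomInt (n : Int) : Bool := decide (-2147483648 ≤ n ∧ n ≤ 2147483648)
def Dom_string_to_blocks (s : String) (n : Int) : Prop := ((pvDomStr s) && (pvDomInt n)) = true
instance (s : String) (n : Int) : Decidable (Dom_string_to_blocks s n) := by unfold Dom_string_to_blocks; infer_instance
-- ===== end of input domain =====

-- B replaces A's range/slice/int.from_bytes chunking by a single pass with a running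
-- accumulator and byte count (objective: alternative decomposition, same O(len s) cost).

-- ===== PORT A =====
-- int.from_bytes(chunk, 'big'): big-endian base-256 value of the byte list (exact).
def fromBytesBig (chunk : List Int) : Int := chunk.foldl (fun a b => a * 256 + b) 0

def string_to_blocks (s : String) (n : Int) : List Int :=
  -- s.encode("utf-8"): on the ASCII domain each char is one byte equal to its code point (exact on Dom).
  let data : List Int := s.toList.map (fun c => (c.toNat : Int))
  let maxBytes : Int := max 1 (PySem.Int.floordiv ((PySem.Int.bitLength n : Int) - 1) 8)
  (PySem.List.pyRange 0 (PySem.List.len data) maxBytes).foldl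
    (fun blocks i =>
      blocks ++ [fromBytesBig (PySem.List.slice data (some i) (some (i + maxBytes)))]) []

-- ===== PORT B =====
-- loop body of Source B: acc = acc*256 + byte; cnt += 1; flush a block when cnt == max_bytes
def blockStep (maxBytes : Int) (st : Int × Int × List Int) (byte : Int) : Int × Int × List Int :=
  let acc := st.1 * 256 + byte
  let cnt := st.2.1 + 1
  if cnt = maxBytes then (0, 0, st.2.2 ++ [acc]) else (acc, cnt, st.2.2)

def string_to_blocks_alt (s : String) (n : Int) : List Int :=
  let maxBytes : Int := max 1 (PySem.Int.floordiv ((PySem.Int.bitLength n : Int) - 1) 8)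
  -- for byte in s.encode("utf-8"): one byte per char on the ASCII domain (exact on Dom).
  let data : List Int := s.toList.map (fun c => (c.toNat : Int))
  let fin := data.foldl (blockStep maxBytes) (0, 0, [])
  if fin.2.1 > 0 then fin.2.2 ++ [fin.1] else fin.2.2

-- ===== PRECONDITION & SPEC =====
def Spec_string_to_blocks (s : String) (n : Int) (out : List Int) : Prop := out = string_to_blocks_alt s n
instance (s : String) (n : Int) (out : List Int) : Decidable (Spec_string_to_blocks s n out) := by unfold Spec_string_to_blocks; infer_instance

-- ===== CLAIM (what is proved, stated in full; the proofs are below) =====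
def Claim_equal_string_to_blocks : Prop := ∀ (s : String) (n : Int), Dom_string_to_blocks s n → Spec_string_to_blocks s n (string_to_blocks s n)

-- ===== LEMMAS AND PROOFS =====

-- reference chunking: big-endian value of successive blocks of (Kp+1) bytes
def chunks (Kp : Nat) : List Int → List Int
  | [] => []
  | x :: xs =>
    fromBytesBig ((x :: xs).take (Kp + 1)) :: chunks Kp ((x :: xs).drop (Kp + 1))
  termination_by l => l.length
  decreasing_by simp

lemma chunks_nil (Kp : Nat) : chunks Kp [] = [] := by
  rw [chunks]

lemma chunks_cons (Kp : Nat) (x : Int) (xs : List Int) :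
    chunks Kp (x :: xs)
      = fromBytesBig ((x :: xs).take (Kp + 1)) :: chunks Kp ((x :: xs).drop (Kp + 1)) := by
  rw [chunks]

lemma pyRange_zero_cons_step (k m : Int) (hk : 1 ≤ k) (hm : 0 < m) :
    PySem.List.pyRange 0 m k = 0 :: (PySem.List.pyRange 0 (m - k) k).map (· + k) := by
  rw [PySem.List.pyRange_of_pos _ _ (by omega : (0:Int) < k),
      PySem.List.pyRange_of_pos _ _ (by omega : (0:Int) < k)]
  have h1 : (if (0:Int) < m then ((m - 0 + k - 1) / k).toNat else 0)
      = (if (0:Int) < m - k then ((m - k - 0 + k - 1) / k).toNat else 0) + 1 := by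
    by_cases hmk : (0:Int) < m - k
    · simp only [if_pos hm, if_pos hmk]
      have e1 : m - 0 + k - 1 = (m - 1) + 1 * k := by ring
      have e2 : m - k - 0 + k - 1 = m - 1 := by ring
      rw [e1, e2, Int.add_mul_ediv_right (m - 1) 1 (show k ≠ 0 by omega)]
      have h0 : 0 ≤ (m - 1) / k := Int.ediv_nonneg (by omega) (by omega)
      omega
    · simp only [if_pos hm, if_neg hmk]
      have e1 : m - 0 + k - 1 = (m - 1) + 1 * k := by ring
      rw [e1, Int.add_mul_ediv_right (m - 1) 1 (show k ≠ 0 by omega)]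
      have h0 : (m - 1) / k = 0 := Int.ediv_eq_zero_of_lt (by omega) (by omega)
      rw [h0]
      decide
  rw [h1, List.range_succ_eq_map]
  simp only [List.map_cons, List.map_map]
  congr 1
  · simp
  · apply List.map_congr_left
    intro j _
    simp only [Function.comp_apply, Nat.succ_eq_add_one]
    push_cast
    ring

lemma mem_pyRange_zero_pos_nonneg (k c i : Int) (hk : 1 ≤ k)
    (hi : i ∈ PySem.List.pyRange 0 c k) : 0 ≤ i := by
  rw [PySem.List.pyRange_of_pos _ _ (by omega : (0:Int) < k)] at hi
  simp only [List.mem_map, List.mem_range] at hi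
  obtain ⟨j, _, rfl⟩ := hi
  positivity

lemma slice_shift (l : List Int) (k i : Int) (hk : 1 ≤ k) (h0i : 0 ≤ i) :
    PySem.List.slice l (some (i + k)) (some (i + k + k))
      = PySem.List.slice (l.drop k.toNat) (some i) (some (i + k)) := by
  rw [PySem.List.slice_toNat _ (by omega) (by omega),
      PySem.List.slice_toNat _ (by omega) (by omega)]
  have h1 : (i + k).toNat = i.toNat + k.toNat := by omega
  rw [h1]
  have h2 : (i + k + k).toNat - (i.toNat + k.toNat) = k.toNat := by omega
  have h3 : i.toNat + k.toNat - i.toNat = k.toNat := by omega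
  rw [h2, h3, List.drop_drop]
  have h4 : k.toNat + i.toNat = i.toNat + k.toNat := by omega
  rw [h4]

lemma rangeMap_eq_chunks (k : Int) (hk : 1 ≤ k) :
    ∀ (N : Nat) (l : List Int), l.length ≤ N →
      (PySem.List.pyRange 0 (l.length : Int) k).map
        (fun i => fromBytesBig (PySem.List.slice l (some i) (some (i + k)))) =
      chunks (k.toNat - 1) l := by
  have hKk : ((k.toNat : Int)) = k := Int.toNat_of_nonneg (by omega)
  intro N
  induction N with
  | zero =>
    intro l hl
    have : l = [] := List.eq_nil_of_length_eq_zero (by omega)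
    subst this
    simp [PySem.List.pyRange_of_pos _ _ (by omega : (0:Int) < k), chunks_nil]
  | succ N ih =>
    intro l hl
    match l with
    | [] => simp [PySem.List.pyRange_of_pos _ _ (by omega : (0:Int) < k), chunks_nil]
    | x :: xs =>
      have hlc : (x :: xs).length = xs.length + 1 := rfl
      have hm : 0 < ((x :: xs).length : Int) := by
        rw [hlc]; push_cast; omega
      rw [pyRange_zero_cons_step k _ hk hm]
      simp only [List.map_cons, List.map_map]
      have hK1 : k.toNat - 1 + 1 = k.toNat := by omega
      have hhead : PySem.List.slice (x :: xs) (some 0) (some (0 + k)) = (x :: xs).take k.toNat := by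
        rw [zero_add, PySem.List.slice_toNat _ le_rfl (by omega)]
        simp
      have htail : ((PySem.List.pyRange 0 (((x :: xs).length : Int) - k) k).map
            ((fun i => fromBytesBig (PySem.List.slice (x :: xs) (some i) (some (i + k)))) ∘ (· + k))) =
          chunks (k.toNat - 1) ((x :: xs).drop k.toNat) := by
        by_cases hmk : ((x :: xs).length : Int) ≤ k
        · have hdrop : (x :: xs).drop k.toNat = [] :=
            List.drop_eq_nil_of_le (by omega)
          rw [hdrop, PySem.List.pyRange_of_pos _ _ (by omega : (0:Int) < k),
              if_neg (by omega)]
          simp [chunks_nil]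
        · have hstep : ∀ i ∈ PySem.List.pyRange 0 (((x :: xs).length : Int) - k) k,
              ((fun i => fromBytesBig (PySem.List.slice (x :: xs) (some i) (some (i + k)))) ∘ (· + k)) i
                = fromBytesBig (PySem.List.slice ((x :: xs).drop k.toNat) (some i) (some (i + k))) := by
            intro i hi
            have h0i : 0 ≤ i := mem_pyRange_zero_pos_nonneg k _ i hk hi
            simp only [Function.comp_apply]
            rw [slice_shift (x :: xs) k i hk h0i]
          rw [List.map_congr_left hstep]
          have hlen : (((x :: xs).drop k.toNat).length : Int) = ((x :: xs).length : Int) - k := by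
            rw [List.length_drop]; omega
          rw [← hlen]
          exact ih ((x :: xs).drop k.toNat)
            (by rw [List.length_drop]; omega)
      rw [htail, chunks_cons, hK1, hhead]

lemma blockStep_run (k : Int) :
    ∀ (chunk : List Int) (acc c : Int) (bl : List Int),
      c + (chunk.length : Int) < k →
      chunk.foldl (blockStep k) (acc, c, bl)
        = (chunk.foldl (fun a b => a * 256 + b) acc, c + (chunk.length : Int), bl) := by
  intro chunk
  induction chunk with
  | nil => intro acc c bl _; simp
  | cons y ys ih =>
    intro acc c bl hlt
    rw [List.length_cons] at hlt
    push_cast at hlt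
    simp only [List.foldl_cons]
    have h1 : blockStep k (acc, c, bl) y = (acc * 256 + y, c + 1, bl) := by
      simp only [blockStep]
      rw [if_neg (by omega)]
    rw [h1, ih _ _ _ (by omega)]
    have h2 : c + 1 + (ys.length : Int) = c + (((y :: ys).length : Nat) : Int) := by
      rw [List.length_cons]; push_cast; ring
    rw [h2]

lemma blockStep_flush (k : Int) (hk : 1 ≤ k) :
    ∀ (chunk rest bl : List Int), chunk.length = k.toNat →
      (chunk ++ rest).foldl (blockStep k) (0, 0, bl)
        = rest.foldl (blockStep k) (0, 0, bl ++ [fromBytesBig chunk]) := by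
  intro chunk rest bl hlen
  have hne : chunk ≠ [] := by intro h; subst h; simp at hlen; omega
  have hsplit : chunk = chunk.dropLast ++ [chunk.getLast hne] :=
    (List.dropLast_append_getLast hne).symm
  rw [List.foldl_append]
  conv_lhs => rw [hsplit]
  rw [List.foldl_append, blockStep_run k chunk.dropLast 0 0 bl
      (by rw [List.length_dropLast, hlen]; omega)]
  simp only [List.foldl_cons, List.foldl_nil]
  have hcnt : (0 : Int) + ((chunk.dropLast.length : Nat) : Int) + 1 = k := by
    rw [List.length_dropLast, hlen]; omega
  have hstep : blockStep k (chunk.dropLast.foldl (fun a b => a * 256 + b) 0,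
      0 + ((chunk.dropLast.length : Nat) : Int), bl) (chunk.getLast hne)
      = (0, 0, bl ++ [fromBytesBig chunk]) := by
    simp only [blockStep]
    rw [if_pos hcnt]
    congr 2
    conv_rhs => rw [hsplit]
    simp [fromBytesBig, List.foldl_append]
  rw [hstep]

lemma foldB_eq_chunks (k : Int) (hk : 1 ≤ k) :
    ∀ (N : Nat) (l : List Int), l.length ≤ N → ∀ (bl : List Int),
      (if (l.foldl (blockStep k) (0, 0, bl)).2.1 > 0
       then (l.foldl (blockStep k) (0, 0, bl)).2.2 ++ [(l.foldl (blockStep k) (0, 0, bl)).1]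
       else (l.foldl (blockStep k) (0, 0, bl)).2.2)
      = bl ++ chunks (k.toNat - 1) l := by
  have hKk : ((k.toNat : Int)) = k := Int.toNat_of_nonneg (by omega)
  intro N
  induction N with
  | zero =>
    intro l hl bl
    have : l = [] := List.eq_nil_of_length_eq_zero (by omega)
    subst this
    simp [chunks_nil]
  | succ N ih =>
    intro l hl bl
    match l with
    | [] => simp [chunks_nil]
    | x :: xs =>
      have hlc : (x :: xs).length = xs.length + 1 := rfl
      have hK1 : k.toNat - 1 + 1 = k.toNat := by omega
      by_cases hmk : (x :: xs).length < k.toNat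
      · -- partial final block
        rw [blockStep_run k (x :: xs) 0 0 bl (by omega)]
        rw [if_pos (by simp)]
        rw [chunks_cons, hK1]
        have htake : (x :: xs).take k.toNat = x :: xs :=
          List.take_of_length_le (by omega)
        have hdrop : (x :: xs).drop k.toNat = [] :=
          List.drop_eq_nil_of_le (by omega)
        rw [htake, hdrop, chunks_nil]
        simp [fromBytesBig]
      · -- a full block is flushed
        have hfold : (x :: xs).foldl (blockStep k) (0, 0, bl)
            = ((x :: xs).drop k.toNat).foldl (blockStep k)
                (0, 0, bl ++ [fromBytesBig ((x :: xs).take k.toNat)]) := by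
          conv_lhs => rw [← List.take_append_drop k.toNat (x :: xs)]
          exact blockStep_flush k hk _ _ _ (by rw [List.length_take]; omega)
        rw [hfold]
        rw [ih ((x :: xs).drop k.toNat) (by rw [List.length_drop]; omega)]
        rw [chunks_cons, hK1]
        simp [List.append_assoc]

-- ===== VERDICT (by name: the statement is the Claim_ definition above) =====
theorem string_to_blocks_spec : Claim_equal_string_to_blocks := by
  intro s n _
  show string_to_blocks s n = string_to_blocks_alt s n
  simp only [string_to_blocks, string_to_blocks_alt]
  set k : Int := max 1 (PySem.Int.floordiv ((PySem.Int.bitLength n : Int) - 1) 8) with hkdef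
  have hk : 1 ≤ k := le_max_left 1 _
  set data : List Int := s.toList.map (fun c => (c.toNat : Int)) with hdata
  rw [PySem.List.len_eq]
  rw [PySem.List.foldl_append_singleton_eq_map]
  rw [rangeMap_eq_chunks k hk data.length data le_rfl]
  rw [foldB_eq_chunks k hk data.length data le_rfl []]
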